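-- pv_equiv track=rewrite | github.com/smaaland/python-sandbox | adventofcode/2018/day8.py | rec_row
-- ===== SOURCE A (Python) =====
-- def rec_row(row):
--     c, m = row[:2]
--     data = row[2:]
--     scores = []
--     totals = 0
--
--     for i in range(c):
--         total, score, data = rec_row(data)
--         totals += total
--         scores.append(score)
--
--     totals += sum(data[:m])
--
--     if c == 0:
--         return totals, sum(data[:m]), data[m:]
--     else:
--         return totals, sum(scores[k - 1] for k in data[:m] if 0 < k <= len(scores)), data[m:]
-- ===== SOURCE B (Python) =====
-- def rec_row(row):
--     c, m = row[:2]
--     data = row[2:]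
--     stack = [(c, m, [], c == 0)]
--     totals = 0
--     while True:
--         c, m, scores, leaf = stack[-1]
--         if c > 0:
--             c2, m2 = data[:2]
--             data = data[2:]
--             stack[-1] = (c - 1, m, scores, leaf)
--             stack.append((c2, m2, [], c2 == 0))
--         else:
--             meta = data[:m]
--             data = data[m:]
--             totals += sum(meta)
--             score = sum(meta) if leaf else sum(scores[k - 1] for k in meta if 0 < k <= len(scores))
--             stack.pop()
--             if not stack:
--                 return totals, score, data
--             p = stack[-1]
--             stack[-1] = (p[0], p[1], p[2] + [score], p[3])
-- ===== Notes on version B (the rewrite author's own statement) =====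
-- stated objective: alternative
-- what changed: Replaces A's recursion (with a per-node for-loop over children) by a single iterative loop over an explicit stack of frames (remaining-children, metadata count, accumulated child scores, leaf flag), consuming the input front-to-back.
import Mathlib
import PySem

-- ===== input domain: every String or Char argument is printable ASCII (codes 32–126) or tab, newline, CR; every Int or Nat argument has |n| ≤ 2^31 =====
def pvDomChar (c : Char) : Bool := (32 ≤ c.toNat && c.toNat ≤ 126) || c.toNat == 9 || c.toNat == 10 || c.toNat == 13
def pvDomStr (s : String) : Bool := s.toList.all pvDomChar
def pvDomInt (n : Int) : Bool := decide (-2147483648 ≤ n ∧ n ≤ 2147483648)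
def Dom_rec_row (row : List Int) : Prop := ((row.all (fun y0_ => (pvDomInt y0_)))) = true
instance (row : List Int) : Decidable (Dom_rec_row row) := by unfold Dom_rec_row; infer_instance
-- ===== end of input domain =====

-- B replaces A's recursion by one iterative loop over an explicit stack of frames; return value unchanged ("alternative" decomposition).

-- termination helper cited by the ports: xs[m:] is never longer than xs
theorem pvLenSliceFrom {α : Type} (xs : List α) (m : Int) :
    (PySem.List.slice xs (some m) none).length ≤ xs.length := by
  rw [PySem.List.slice_some_none]; simp

-- shared helper: the genexpr 'sum(scores[k - 1] for k in meta if 0 < k <= len(scores))',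
-- which appears verbatim in both Pythons
def scoreIdx (scores : List Int) (md : List Int) : Int :=
  md.foldl (fun acc k =>
    if 0 < k ∧ k ≤ (scores.length : Int) then acc + scores.getD (k - 1).toNat 0 else acc) 0

-- ===== PORT A =====
-- A's recursion; the subtype records that the returned remainder is no longer than the input
-- (needed only for termination). The fallback '(0,0,[])' branch is where Python raises
-- ValueError (a short header), excluded by Pre_rec_row.
mutual
def nodeA : (d : List Int) → Int × Int × {r : List Int // r.length ≤ d.length}
  | c :: m :: d0 =>
    let x := childrenA c.toNat d0
    let md := PySem.List.slice x.2.2.val none (some m)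
    let rest := PySem.List.slice x.2.2.val (some m) none
    let totals := x.1 + md.sum
    if c = 0 then
      (totals, md.sum,
        ⟨rest, le_trans (pvLenSliceFrom _ _) (le_trans x.2.2.property (by simp; omega))⟩)
    else
      (totals, scoreIdx x.2.1 md,
        ⟨rest, le_trans (pvLenSliceFrom _ _) (le_trans x.2.2.property (by simp; omega))⟩)
  | _ => (0, 0, ⟨[], by simp⟩)
termination_by d => (d.length, 0)
decreasing_by exact Prod.Lex.left _ _ (by simp)

def childrenA : (n : Nat) → (d : List Int) → Int × List Int × {r : List Int // r.length ≤ d.length}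
  | 0, d => (0, [], ⟨d, le_refl _⟩)
  | (k + 1), d =>
    match nodeA d with
    | (t, s, r) =>
      match childrenA k r.val with
      | (ts, ss, r2) => (t + ts, s :: ss, ⟨r2.val, le_trans r2.property r.property⟩)
termination_by k d => (d.length + 1, k + 1)
decreasing_by
  · exact Prod.Lex.left _ _ (by omega)
  · have h := r.property
    rcases Nat.lt_or_eq_of_le h with h' | h'
    · exact Prod.Lex.left _ _ (by omega)
    · rw [h']; exact Prod.Lex.right _ (by omega)
end

def rec_row (row : List Int) : Int × Int × List Int :=
  let res := nodeA row
  (res.1, res.2.1, res.2.2.val)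

-- ===== PORT B =====
-- B's machine: frames are (remaining children, metadata count, child scores, leaf flag).
def runB (data : List Int) (stack : List (Int × Int × List Int × Bool)) (totals : Int) :
    Int × Int × List Int :=
  match stack with
  | [] => (0, 0, [])   -- unreachable: B's loop keeps the stack nonempty until it returns
  | (c, m, scores, leaf) :: stk =>
    if 0 < c then
      match data with
      | c2 :: m2 :: d' =>
        runB d' ((c2, m2, [], c2 == 0) :: (c - 1, m, scores, leaf) :: stk) totals
      | _ => (0, 0, [])   -- Python raises ValueError (short header), excluded by Pre_rec_row
    else
      let md := PySem.List.slice data none (some m)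
      let rest := PySem.List.slice data (some m) none
      let score := if leaf then md.sum else scoreIdx scores md
      match stk with
      | [] => (totals + md.sum, score, rest)
      | (c', m', scores', leaf') :: stk' =>
        runB rest ((c', m', scores' ++ [score], leaf') :: stk') (totals + md.sum)
termination_by 2 * data.length + stack.length
decreasing_by
  · simp; omega
  · have := pvLenSliceFrom data m; simp; omega

def rec_row_alt (row : List Int) : Int × Int × List Int :=
  match row with
  | c :: m :: data => runB data [(c, m, [], c == 0)] 0
  | _ => (0, 0, [])

-- ===== PRECONDITION & SPEC =====
-- structural checker deciding Pre_: the same left-to-right scan a reader does on the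
-- encoding, with a fuel bound (row.length + 1 steps always suffice: the scan takes one
-- step per node header and one per node pop, and every node owns 2 header slots).
def pskip : Nat → List (Nat × Int) → List Int → Bool
  | 0, _, _ => false
  | _ + 1, [], _ => true
  | f + 1, (0, m) :: stk, data => pskip f stk (PySem.List.slice data (some m) none)
  | f + 1, (k + 1, m) :: stk, data =>
    match data with
    | c :: m2 :: d0 => pskip f ((c.toNat, m2) :: (k, m) :: stk) d0
    | _ => false

-- Pre_ = A returns normally: the row starts with a complete tree encoding (every header
-- read finds at least 2 remaining numbers); elsewhere A raises ValueError.
def Pre_rec_row (row : List Int) : Prop :=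
  (match row with
   | c :: m :: data => pskip (row.length + 1) [(c.toNat, m)] data
   | _ => false) = true

instance (row : List Int) : Decidable (Pre_rec_row row) := by unfold Pre_rec_row; infer_instance

def pvWitness_rec_row : List Int := [1, 1, 0, 1, 5, 2]

def Spec_rec_row (row : List Int) (out : Int × Int × List Int) : Prop := out = rec_row_alt row
instance (row : List Int) (out : Int × Int × List Int) : Decidable (Spec_rec_row row out) := by
  unfold Spec_rec_row; infer_instance

-- ===== CLAIM (what is proved, stated in full; the proofs are below) =====
def Claim_equal_rec_row : Prop :=
  ∀ (row : List Int), Dom_rec_row row → Pre_rec_row row → Spec_rec_row row (rec_row row)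

-- ===== LEMMAS AND PROOFS =====
-- proof-only skip functions: the remainder a well-formed node/child-sequence leaves
mutual
def skipNode? : (d : List Int) → Option {r : List Int // r.length + 2 ≤ d.length}
  | c :: m :: d0 =>
    match skipChildren? c.toNat d0 with
    | some r =>
      some ⟨PySem.List.slice r.val (some m) none,
        by have h1 := pvLenSliceFrom r.val m; have h2 := r.property; simp; omega⟩
    | none => none
  | _ => none
termination_by d => (d.length, 0)
decreasing_by exact Prod.Lex.left _ _ (by simp)

def skipChildren? : (n : Nat) → (d : List Int) → Option {r : List Int // r.length ≤ d.length}
  | 0, d => some ⟨d, le_refl _⟩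
  | (k + 1), d =>
    match skipNode? d with
    | some r =>
      match skipChildren? k r.val with
      | some r2 => some ⟨r2.val, by have := r2.property; have := r.property; omega⟩
      | none => none
    | none => none
termination_by k d => (d.length + 1, k + 1)
decreasing_by
  · exact Prod.Lex.left _ _ (by omega)
  · have := r.property
    exact Prod.Lex.left _ _ (by omega)
end

-- what a true pskip scan asserts about each pending frame, in order
def Chain : List (Nat × Int) → List Int → Prop
  | [], _ => True
  | (k, m) :: stk', d =>
    ∃ r : {r : List Int // r.length ≤ d.length},
      skipChildren? k d = some r ∧ Chain stk' (PySem.List.slice r.val (some m) none)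

theorem pskip_sound :
    ∀ (f : Nat) (stk : List (Nat × Int)) (d : List Int), pskip f stk d = true → Chain stk d := by
  intro f
  induction f with
  | zero => intro stk d h; rw [pskip] at h; cases h
  | succ f ih =>
    intro stk d h
    match stk with
    | [] => trivial
    | (0, m) :: stk' =>
      rw [pskip] at h
      exact ⟨⟨d, le_refl _⟩, by rw [skipChildren?], ih _ _ h⟩
    | (k + 1, m) :: stk' =>
      match d with
      | [] => simp [pskip] at h
      | [x] => simp [pskip] at h
      | c :: m2 :: d0 =>
        rw [pskip] at h
        obtain ⟨rc, hrc, hch⟩ := ih _ _ h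
        obtain ⟨r1, hr1, hch'⟩ := hch
        refine ⟨⟨r1.val, ?_⟩, ?_, hch'⟩
        · have h1 := r1.property
          have h2 := pvLenSliceFrom rc.val m2
          have h3 := rc.property
          simp; omega
        · rw [skipChildren?, show skipNode? (c :: m2 :: d0) =
            some ⟨PySem.List.slice rc.val (some m2) none,
              by have := pvLenSliceFrom rc.val m2; have := rc.property; simp; omega⟩ from
              by rw [skipNode?, hrc]]
          dsimp only
          rw [hr1]

-- proof-only helper: the (totals-free) output of one frame whose children region is d
def frameOut (d : List Int) (n : Nat) (m : Int) (scores : List Int) (leaf : Bool) :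
    Int × Int × List Int :=
  let x := childrenA n d
  let md := PySem.List.slice x.2.2.val none (some m)
  (x.1 + md.sum,
   if leaf then md.sum else scoreIdx (scores ++ x.2.1) md,
   PySem.List.slice x.2.2.val (some m) none)

theorem childrenA_succ (k : Nat) (d : List Int) :
    (childrenA (k + 1) d).1 = (nodeA d).1 + (childrenA k (nodeA d).2.2.val).1 ∧
    (childrenA (k + 1) d).2.1 = (nodeA d).2.1 :: (childrenA k (nodeA d).2.2.val).2.1 ∧
    (childrenA (k + 1) d).2.2.val = (childrenA k (nodeA d).2.2.val).2.2.val := by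
  rw [childrenA]
  generalize nodeA d = p
  rcases p with ⟨t, s, rr⟩
  dsimp only
  generalize childrenA k rr.val = q
  rcases q with ⟨ts, ss, r2⟩
  exact ⟨rfl, rfl, rfl⟩

theorem childrenA_rem :
    ∀ (N : Nat) (d : List Int), d.length ≤ N →
      (∀ r, skipNode? d = some r → (nodeA d).2.2.val = r.val) ∧
      (∀ (n : Nat) r, skipChildren? n d = some r → (childrenA n d).2.2.val = r.val) := by
  intro N
  induction N with
  | zero =>
    intro d hd
    have hd0 : d = [] := List.eq_nil_of_length_eq_zero (Nat.le_zero.mp hd)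
    subst hd0
    refine ⟨?_, ?_⟩
    · intro r hr; simp [skipNode?] at hr
    · intro n r hr
      cases n with
      | zero =>
        rw [skipChildren?] at hr
        have h := Option.some.inj hr
        rw [← h]
        simp [childrenA]
      | succ k => simp [skipChildren?, skipNode?] at hr
  | succ N ih =>
    intro d hd
    have h1 : ∀ r, skipNode? d = some r → (nodeA d).2.2.val = r.val := by
      intro r hr
      cases d with
      | nil => simp [skipNode?] at hr
      | cons c t =>
        cases t with
        | nil => simp [skipNode?] at hr
        | cons m d0 =>
          rw [skipNode?] at hr
          cases hs : skipChildren? c.toNat d0 with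
          | none => rw [hs] at hr; cases hr
          | some r1 =>
            rw [hs] at hr
            have hv := congrArg Subtype.val (Option.some.inj hr)
            have hlen : d0.length ≤ N := by simp at hd; omega
            have hrem := (ih d0 hlen).2 c.toNat r1 hs
            rw [nodeA]
            split_ifs <;> simp [hrem, ← hv]
    refine ⟨h1, ?_⟩
    intro n r hr
    cases n with
    | zero =>
      rw [skipChildren?] at hr
      have h := Option.some.inj hr
      rw [← h]
      simp [childrenA]
    | succ k =>
      rw [skipChildren?] at hr
      cases hs1 : skipNode? d with
      | none => rw [hs1] at hr; dsimp only at hr; cases hr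
      | some r1 =>
        rw [hs1] at hr
        dsimp only at hr
        cases hs2 : skipChildren? k r1.val with
        | none => rw [hs2] at hr; cases hr
        | some r2 =>
          rw [hs2] at hr
          have hv := congrArg Subtype.val (Option.some.inj hr)
          have e1 := h1 r1 hs1
          have hlen1 : r1.val.length ≤ N := by have := r1.property; omega
          have e2 := (ih r1.val hlen1).2 k r2 hs2
          rw [(childrenA_succ k d).2.2, e1, e2]
          exact hv

theorem nodeA_eq_frameOut (c m : Int) (d0 : List Int) :
    nodeA (c :: m :: d0) =
      ((frameOut d0 c.toNat m [] (c == 0)).1,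
       (frameOut d0 c.toNat m [] (c == 0)).2.1,
       ⟨(frameOut d0 c.toNat m [] (c == 0)).2.2,
        le_trans (pvLenSliceFrom _ _)
          (le_trans (childrenA c.toNat d0).2.2.property (by simp; omega))⟩) := by
  rw [nodeA]
  split_ifs with hc <;>
    simp [frameOut, hc]

theorem runB_pop (d : List Int) (c m : Int) (scores : List Int) (leaf : Bool)
    (stk : List (Int × Int × List Int × Bool)) (totals : Int) (hc : ¬ 0 < c) :
    runB d ((c, m, scores, leaf) :: stk) totals =
      (match stk with
       | [] => (totals + (frameOut d c.toNat m scores leaf).1,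
                (frameOut d c.toNat m scores leaf).2.1,
                (frameOut d c.toNat m scores leaf).2.2)
       | (c', m', sc', lf') :: stk' =>
         runB (frameOut d c.toNat m scores leaf).2.2
           ((c', m', sc' ++ [(frameOut d c.toNat m scores leaf).2.1], lf') :: stk')
           (totals + (frameOut d c.toNat m scores leaf).1)) := by
  have hct : c.toNat = 0 := by omega
  rw [runB.eq_def]
  rcases stk with _ | ⟨⟨c', m', sc', lf'⟩, stk'⟩ <;>
    simp [if_neg hc, hct, frameOut, childrenA]

theorem runB_frame :
    ∀ (N : Nat) (d : List Int), d.length ≤ N →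
    ∀ (c m : Int) (scores : List Int) (leaf : Bool)
      (stk : List (Int × Int × List Int × Bool)) (totals : Int),
      (skipChildren? c.toNat d).isSome = true →
      runB d ((c, m, scores, leaf) :: stk) totals =
        (match stk with
         | [] => (totals + (frameOut d c.toNat m scores leaf).1,
                  (frameOut d c.toNat m scores leaf).2.1,
                  (frameOut d c.toNat m scores leaf).2.2)
         | (c', m', sc', lf') :: stk' =>
           runB (frameOut d c.toNat m scores leaf).2.2
             ((c', m', sc' ++ [(frameOut d c.toNat m scores leaf).2.1], lf') :: stk')
             (totals + (frameOut d c.toNat m scores leaf).1)) := by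
  intro N
  induction N with
  | zero =>
    intro d hd c m scores leaf stk totals hsome
    by_cases hc : 0 < c
    · exfalso
      have hd0 : d = [] := List.eq_nil_of_length_eq_zero (Nat.le_zero.mp hd)
      subst hd0
      have hk : c.toNat = (c.toNat - 1) + 1 := by omega
      rw [hk, skipChildren?] at hsome
      rw [show skipNode? ([] : List Int) = none from by simp [skipNode?]] at hsome
      simp at hsome
    · exact runB_pop d c m scores leaf stk totals hc
  | succ N ih =>
    intro d hd c m scores leaf stk totals hsome
    by_cases hc : 0 < c
    · have hk : c.toNat = (c.toNat - 1) + 1 := by omega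
      set k := c.toNat - 1 with hkdef
      rw [hk, skipChildren?] at hsome
      cases hs1 : skipNode? d with
      | none => rw [hs1] at hsome; dsimp only at hsome; simp at hsome
      | some r1 =>
        rw [hs1] at hsome; dsimp only at hsome
        cases hs2 : skipChildren? k r1.val with
        | none => rw [hs2] at hsome; dsimp only at hsome; simp at hsome
        | some r2 =>
          clear hsome
          cases d with
          | nil => simp [skipNode?] at hs1
          | cons c2 t =>
            cases t with
            | nil => simp [skipNode?] at hs1
            | cons m2 d0 =>
              rw [skipNode?] at hs1
              cases hsc : skipChildren? c2.toNat d0 with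
              | none => rw [hsc] at hs1; cases hs1
              | some rc =>
                rw [hsc] at hs1; dsimp only at hs1
                have hr1 : r1.val = PySem.List.slice rc.val (some m2) none :=
                  (congrArg Subtype.val (Option.some.inj hs1)).symm
                have hd0len : d0.length ≤ N := by simp at hd; omega
                have hlen1 : r1.val.length ≤ N := by
                  have := r1.property; simp at hd; simp at this; omega
                have hc1 : ((c : Int) - 1).toNat = k := by omega
                -- child remainder = r1.val
                have hrem0 : (frameOut d0 c2.toNat m2 [] (c2 == 0)).2.2 = r1.val := by
                  show PySem.List.slice (childrenA c2.toNat d0).2.2.val (some m2) none = r1.val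
                  rw [(childrenA_rem N d0 hd0len).2 c2.toNat rc hsc, hr1]
                -- LHS: one push step, then the two inner frames by ih
                rw [runB.eq_def]
                dsimp only
                rw [if_pos hc]
                rw [ih d0 hd0len c2 m2 [] (c2 == 0) ((c - 1, m, scores, leaf) :: stk) totals
                      (by rw [hsc]; rfl)]
                dsimp only
                rw [hrem0]
                rw [ih r1.val hlen1 (c - 1) m
                      (scores ++ [(frameOut d0 c2.toNat m2 [] (c2 == 0)).2.1]) leaf stk
                      (totals + (frameOut d0 c2.toNat m2 [] (c2 == 0)).1)
                      (by rw [hc1, hs2]; rfl)]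
                -- components of the combined frame
                have hnode := nodeA_eq_frameOut c2 m2 d0
                have hsucc := childrenA_succ k (c2 :: m2 :: d0)
                have hnrem : (nodeA (c2 :: m2 :: d0)).2.2.val = r1.val := by
                  rw [hnode]; exact hrem0
                have hF :
                    frameOut (c2 :: m2 :: d0) (k + 1) m scores leaf =
                      ((frameOut d0 c2.toNat m2 [] (c2 == 0)).1 +
                        (frameOut r1.val ((c : Int) - 1).toNat m
                          (scores ++ [(frameOut d0 c2.toNat m2 [] (c2 == 0)).2.1]) leaf).1,
                       (frameOut r1.val ((c : Int) - 1).toNat m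
                          (scores ++ [(frameOut d0 c2.toNat m2 [] (c2 == 0)).2.1]) leaf).2.1,
                       (frameOut r1.val ((c : Int) - 1).toNat m
                          (scores ++ [(frameOut d0 c2.toNat m2 [] (c2 == 0)).2.1]) leaf).2.2) := by
                  rw [hc1]
                  show
                    ((childrenA (k + 1) (c2 :: m2 :: d0)).1 + _,
                     _, _) = _
                  rw [hsucc.1, hsucc.2.1, hsucc.2.2, hnrem]
                  have hn1 : (nodeA (c2 :: m2 :: d0)).1 =
                      (frameOut d0 c2.toNat m2 [] (c2 == 0)).1 := by rw [hnode]
                  have hn2 : (nodeA (c2 :: m2 :: d0)).2.1 =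
                      (frameOut d0 c2.toNat m2 [] (c2 == 0)).2.1 := by rw [hnode]
                  rw [hn1, hn2]
                  show _ = ((frameOut d0 c2.toNat m2 [] (c2 == 0)).1 +
                      ((childrenA k r1.val).1 + _), _, _)
                  refine Prod.ext ?_ (Prod.ext ?_ ?_)
                  · dsimp only [frameOut]; ring
                  · dsimp only [frameOut]
                    rw [List.append_assoc]
                    rfl
                  · rfl
                rw [hk, hF]
                rcases stk with _ | ⟨⟨c', m', sc', lf'⟩, stk'⟩ <;> dsimp only
                · refine Prod.ext ?_ rfl
                  ring
                · rw [add_assoc]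
    · have := runB_pop d c m scores leaf stk totals hc
      exact this

-- ===== VERDICT (by name: the statement is the Claim_ definition above) =====
theorem rec_row_spec : Claim_equal_rec_row := by
  intro row hdom hpre
  unfold Spec_rec_row
  cases row with
  | nil => simp [Pre_rec_row] at hpre
  | cons c t =>
    cases t with
    | nil => simp [Pre_rec_row] at hpre
    | cons m data =>
      rw [Pre_rec_row] at hpre
      have hch := pskip_sound _ _ _ hpre
      rw [Chain] at hch
      obtain ⟨rc, hsc, -⟩ := hch
      rw [rec_row, rec_row_alt.eq_def]
      dsimp only
      rw [runB_frame data.length data (le_refl _) c m [] (c == 0) [] 0 (by rw [hsc]; rfl)]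
      rw [nodeA_eq_frameOut c m data]
      dsimp only
      rw [zero_add]
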